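-- pv_equiv track=rewrite | github.com/pragya-hu990/datapoints_comapare | parse_real_responses.py | deduplicate_fields
-- ===== SOURCE A (Python) =====
-- from typing import Dict, List, Set, Any, Optional
-- from collections import defaultdict, OrderedDict
--
-- def deduplicate_fields(fields: List[Dict]) -> List[Dict]:
--     """
--     Deduplicate fields by name, keeping the most detailed version.
--     """
--     unique_fields = OrderedDict()
--
--     for field in fields:
--         name = field['name']
--         if name not in unique_fields:
--             unique_fields[name] = field
--         else:
--             # Keep the one with more information (deeper path usually means more context)
--             if len(field.get('path', '')) > len(unique_fields[name].get('path', '')):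
--                 unique_fields[name] = field
--
--     return list(unique_fields.values())
-- ===== SOURCE B (Python) =====
-- from typing import Dict, List
-- from collections import OrderedDict
--
--
-- def deduplicate_fields(fields: List[Dict]) -> List[Dict]:
--     """
--     Deduplicate fields by name, keeping the most detailed version.
--     Group-by-name first, then pick the deepest-path field of each group
--     (max keeps the first maximal element, matching A's strict-'>' rule).
--     """
--     groups = OrderedDict()
--     for field in fields:
--         groups.setdefault(field['name'], []).append(field)
--     return [max(group, key=lambda f: len(f.get('path', ''))) for group in groups.values()]
-- ===== Notes on version B (the rewrite author's own statement) =====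
-- stated objective: simpler
-- what changed: Replaces the interleaved compare-and-overwrite loop by a group-by pass (name -> list of fields via setdefault/append) followed by a reduce pass taking max by path length per group, relying on max() returning the first maximal element to reproduce the strict-'>' tie behaviour.
import Mathlib
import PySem

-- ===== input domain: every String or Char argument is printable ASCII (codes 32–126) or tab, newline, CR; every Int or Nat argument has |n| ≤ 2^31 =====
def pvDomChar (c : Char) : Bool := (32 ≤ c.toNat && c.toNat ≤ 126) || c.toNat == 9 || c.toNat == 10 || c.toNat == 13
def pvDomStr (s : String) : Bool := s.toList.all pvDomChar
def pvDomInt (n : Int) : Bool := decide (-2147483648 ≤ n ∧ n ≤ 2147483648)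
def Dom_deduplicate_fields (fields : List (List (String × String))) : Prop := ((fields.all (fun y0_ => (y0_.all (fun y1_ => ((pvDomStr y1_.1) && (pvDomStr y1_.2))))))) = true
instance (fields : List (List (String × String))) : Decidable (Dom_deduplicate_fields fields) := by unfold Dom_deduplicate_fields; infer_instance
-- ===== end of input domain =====

-- B replaces A's interleaved compare-and-overwrite loop by a group-by-name pass followed by
-- max-by-path-length per group (objective: simpler decomposition; same cost).

-- shared accessors: field['name'] (exact when the key is present, which Pre_ guarantees;
-- the Python raises KeyError otherwise) and len(field.get('path', ''))
def pvFieldName (f : List (String × String)) : String := (PySem.Dict.mk f).getD "name" ""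
def pvPathLen (f : List (String × String)) : Int := PySem.Str.len ((PySem.Dict.mk f).getD "path" "")

-- ===== PORT A =====
def pvStepA (d : PySem.Dict String (List (String × String))) (field : List (String × String)) :
    PySem.Dict String (List (String × String)) :=
  let name := pvFieldName field
  if d.contains name = false then d.insert name field
  else if pvPathLen field > pvPathLen (d.getD name []) then d.insert name field
  else d

def deduplicate_fields (fields : List (List (String × String))) : List (List (String × String)) :=
  (fields.foldl pvStepA PySem.Dict.empty).values

-- ===== PORT B =====
-- groups.setdefault(name, []).append(field)  =  modify name [] (· ++ [field])
def pvStepB (g : PySem.Dict String (List (List (String × String)))) (field : List (String × String)) :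
    PySem.Dict String (List (List (String × String))) :=
  g.modify (pvFieldName field) [] (fun l => l ++ [field])

def deduplicate_fields_alt (fields : List (List (String × String))) : List (List (String × String)) :=
  let groups := fields.foldl pvStepB PySem.Dict.empty
  groups.values.map (fun group => (PySem.List.max? group pvPathLen).getD [])

-- ===== PRECONDITION & SPEC =====
-- Pre_ excludes exactly the fields without a 'name' key, on which the Python A raises KeyError.
def Pre_deduplicate_fields (fields : List (List (String × String))) : Prop :=
  ∀ f ∈ fields, f.any (fun p => p.1 == "name") = true
instance (fields : List (List (String × String))) : Decidable (Pre_deduplicate_fields fields) := by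
  unfold Pre_deduplicate_fields; infer_instance

def pvWitness_deduplicate_fields : (List (List (String × String))) :=
  [[("name", "a"), ("path", "x.y")], [("name", "a"), ("path", "x")]]

def Spec_deduplicate_fields (fields : List (List (String × String))) (out : List (List (String × String))) : Prop := out = deduplicate_fields_alt fields
instance (fields : List (List (String × String))) (out : List (List (String × String))) : Decidable (Spec_deduplicate_fields fields out) := by unfold Spec_deduplicate_fields; infer_instance

-- ===== CLAIM (what is proved, stated in full; the proofs are below) =====
def Claim_equal_deduplicate_fields : Prop := ∀ (fields : List (List (String × String))), Dom_deduplicate_fields fields → Pre_deduplicate_fields fields → Spec_deduplicate_fields fields (deduplicate_fields fields)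

-- ===== LEMMAS AND PROOFS =====

-- the running max A maintains for one group (first maximal element, strict '<' to replace)
def pvBest (l : List (List (String × String))) : List (String × String) :=
  match l with
  | [] => []
  | h :: t => t.foldl (fun m x => if pvPathLen m < pvPathLen x then x else m) h

lemma pv_max_cons (t : List (List (String × String))) (a : List (String × String)) :
    PySem.List.max? (a :: t) pvPathLen = some (pvBest (a :: t)) := by
  induction t generalizing a with
  | nil => rfl
  | cons b t ih =>
    have h1 : PySem.List.max? (a :: b :: t) pvPathLen
        = PySem.List.max? ((if pvPathLen a < pvPathLen b then b else a) :: t) pvPathLen := by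
      simp only [PySem.List.max?, List.foldl_cons]
      rcases lt_or_ge (pvPathLen a) (pvPathLen b) with h | h
      · simp [h]
      · simp [not_lt.mpr h]
    rw [h1, ih]
    simp [pvBest]

lemma pv_max?_eq_pvBest (l : List (List (String × String))) (h : l ≠ []) :
    PySem.List.max? l pvPathLen = some (pvBest l) := by
  cases l with
  | nil => exact absurd rfl h
  | cons a t => exact pv_max_cons t a

lemma pvBest_append (l : List (List (String × String))) (f : List (String × String)) (h : l ≠ []) :
    pvBest (l ++ [f]) = if pvPathLen (pvBest l) < pvPathLen f then f else pvBest l := by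
  cases l with
  | nil => exact absurd rfl h
  | cons a t => simp [pvBest, List.foldl_append]

lemma pv_get?_map (l : List (String × List (List (String × String)))) (k : String) :
    (PySem.Dict.mk (l.map (fun p => (p.1, pvBest p.2)))).get? k
      = ((PySem.Dict.mk l).get? k).map pvBest := by
  induction l with
  | nil => rfl
  | cons p t ih =>
    obtain ⟨pk, pv⟩ := p
    simp only [List.map_cons, PySem.Dict.get?_mk_cons]
    split <;> simp_all

def pvInv (d : PySem.Dict String (List (String × String)))
    (g : PySem.Dict String (List (List (String × String)))) : Prop :=
  d.items = g.items.map (fun p => (p.1, pvBest p.2))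
  ∧ (∀ p ∈ g.items, p.2 ≠ [])
  ∧ (g.items.map Prod.fst).Nodup

lemma pv_step (d : PySem.Dict String (List (String × String)))
    (g : PySem.Dict String (List (List (String × String))))
    (f : List (String × String)) (h : pvInv d g) : pvInv (pvStepA d f) (pvStepB g f) := by
  obtain ⟨hitems, hne, hnd⟩ := h
  have hkeys : d.contains (pvFieldName f) = g.contains (pvFieldName f) := by
    simp [PySem.Dict.contains, hitems, List.any_map, Function.comp_def]
  have hd_eq : d = PySem.Dict.mk (g.items.map (fun p => (p.1, pvBest p.2))) := by
    cases d; simpa using hitems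
  have hget : d.get? (pvFieldName f) = (g.get? (pvFieldName f)).map pvBest := by
    rw [hd_eq]; exact pv_get?_map g.items (pvFieldName f)
  simp only [pvStepA, pvStepB, PySem.Dict.modify]
  cases hc : g.contains (pvFieldName f) with
  | false =>
    have hdc : d.contains (pvFieldName f) = false := hkeys.trans hc
    have hgnone : g.get? (pvFieldName f) = none := by
      have := PySem.Dict.contains_eq_isSome_get? g (pvFieldName f)
      rw [hc] at this
      exact Option.not_isSome_iff_eq_none.mp (by simp [← this])
    have hnotmem : pvFieldName f ∉ g.items.map Prod.fst := by
      intro hm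
      obtain ⟨p, hp, hp1⟩ := List.mem_map.mp hm
      have : g.contains (pvFieldName f) = true := by
        simp only [PySem.Dict.contains, List.any_eq_true]
        exact ⟨p, hp, by simp [hp1]⟩
      simp [this] at hc
    have hgD : PySem.Dict.getD g (pvFieldName f) [] = [] := by
      simp [PySem.Dict.getD, hgnone]
    rw [hdc, if_pos rfl, hgD]
    refine ⟨?_, ?_, ?_⟩
    · rw [PySem.Dict.items_insert_of_not_contains _ _ hdc,
        PySem.Dict.items_insert_of_not_contains _ _ hc, hitems]
      simp [pvBest]
    · intro p hp
      rw [PySem.Dict.items_insert_of_not_contains _ _ hc] at hp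
      rcases List.mem_append.mp hp with hp | hp
      · exact hne p hp
      · simp at hp; simp [hp]
    · rw [PySem.Dict.items_insert_of_not_contains _ _ hc]
      simp only [List.map_append, List.map_cons, List.map_nil]
      exact List.Nodup.append hnd (List.nodup_singleton _) (by simpa using hnotmem)
  | true =>
    obtain ⟨gv, hgv⟩ : ∃ gv, g.get? (pvFieldName f) = some gv := by
      have := PySem.Dict.contains_eq_isSome_get? g (pvFieldName f)
      rw [hc] at this
      exact Option.isSome_iff_exists.mp this.symm
    have hgvne : gv ≠ [] := hne _ (PySem.Dict.mem_items_of_get?_eq_some g hgv)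
    have hdc : d.contains (pvFieldName f) = true := hkeys.trans hc
    have hdD : d.getD (pvFieldName f) [] = pvBest gv := by
      simp [PySem.Dict.getD, hget, hgv]
    have hgD : PySem.Dict.getD g (pvFieldName f) [] = gv := by
      simp [PySem.Dict.getD, hgv]
    have hvals : ∀ p ∈ g.items, p.1 = pvFieldName f → p.2 = gv := by
      intro p hp hp1
      have hkn : (g.items.map Prod.fst).Nodup := hnd
      have := PySem.Dict.get?_of_mem_items g (k := p.1) (v := p.2) (by simpa using hp)
        (by simpa [PySem.Dict.keys] using hkn)
      rw [hp1, hgv] at this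
      exact (Option.some.inj this).symm
    have hBitems : (g.insert (pvFieldName f) (PySem.Dict.getD g (pvFieldName f) [] ++ [f])).items
        = g.items.map (fun p => if (p.1 == pvFieldName f) = true then (pvFieldName f, gv ++ [f]) else p) := by
      rw [hgD]; exact PySem.Dict.items_insert_of_contains g _ hc
    have hbest : pvBest (gv ++ [f])
        = if pvPathLen (pvBest gv) < pvPathLen f then f else pvBest gv :=
      pvBest_append gv f hgvne
    have hkeysB : (g.items.map (fun p => if (p.1 == pvFieldName f) = true then (pvFieldName f, gv ++ [f]) else p)).map Prod.fst
        = g.items.map Prod.fst := by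
      rw [List.map_map]
      refine List.map_congr_left (fun p hp => ?_)
      by_cases hpn : p.1 = pvFieldName f <;> simp [hpn]
    rw [hdc, hdD]
    refine ⟨?_, ?_, ?_⟩
    · rw [if_neg (show ¬(true = false) by simp), hBitems, List.map_map]
      simp only [gt_iff_lt]
      by_cases hcmp : pvPathLen (pvBest gv) < pvPathLen f
      · rw [if_pos hcmp]
        rw [PySem.Dict.items_insert_of_contains d _ hdc, hitems, List.map_map]
        refine List.map_congr_left (fun p hp => ?_)
        by_cases hpn : p.1 = pvFieldName f <;>
          simp [hpn, hbest, hcmp]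
      · rw [if_neg hcmp, hitems]
        refine List.map_congr_left (fun p hp => ?_)
        by_cases hpn : p.1 = pvFieldName f
        · have := hvals p hp hpn
          simp [hpn, hbest, hcmp, this]
        · simp [hpn]
    · intro p hp
      rw [hBitems] at hp
      obtain ⟨q, hq, hqe⟩ := List.mem_map.mp hp
      by_cases hqn : q.1 = pvFieldName f
      · rw [if_pos (by simp [hqn])] at hqe
        simp [← hqe]
      · rw [if_neg (by simp [hqn])] at hqe
        exact hqe ▸ hne q hq
    · rw [hBitems, hkeysB]; exact hnd

lemma pv_fold (fields : List (List (String × String)))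
    (d : PySem.Dict String (List (String × String)))
    (g : PySem.Dict String (List (List (String × String))))
    (h : pvInv d g) : pvInv (fields.foldl pvStepA d) (fields.foldl pvStepB g) := by
  induction fields generalizing d g with
  | nil => exact h
  | cons f t ih => exact ih _ _ (pv_step d g f h)

-- ===== VERDICT (by name: the statement is the Claim_ definition above) =====
theorem deduplicate_fields_spec : Claim_equal_deduplicate_fields := by
  intro fields _ _
  unfold Spec_deduplicate_fields deduplicate_fields deduplicate_fields_alt
  obtain ⟨hitems, hne, -⟩ := pv_fold fields PySem.Dict.empty PySem.Dict.empty ⟨rfl, by simp [PySem.Dict.empty], by simp [PySem.Dict.empty]⟩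
  simp only [PySem.Dict.values, hitems, List.map_map]
  refine List.map_congr_left (fun p hp => ?_)
  simp [pv_max?_eq_pvBest p.2 (hne p hp)]
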